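-- pv_equiv track=rewrite | github.com/openbmc/openpower-libhei | chip_data/pyprd/util/hash.py | hash_string
-- ===== SOURCE A (Python) =====
-- def hash_string(num_bytes: int, string: str) -> int:
--     """
--     Converts a string into an integer hash value. This is primarily used to
--     convert register and isolation node names from the Chip and RAS Data into
--     integer values to save space in the data.
--     """
--
--     # This hash is a simple "n*s[0] + (n-1)*s[1] + ... + s[n-1]" algorithm,
--     # where s[i] is a chunk from the input string the length of i_bytes.
--
--     # Currently only supporting 1:8 byte hashes
--     assert 1 <= num_bytes and num_bytes <= 8
--
--     # Start hashing each chunk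
--     sumA = 0
--     sumB = 0
--
--     # Iterate one chunk at a time
--     for i in range(0, len(string), num_bytes):
--         # Combine each chunk into a single integer value. If we reach the end
--         # of the string, pad with null characters.
--         chunk = 0
--         for j in range(0, num_bytes):
--             chunk <<= 8
--             chunk |= ord(string[i + j]) if (i + j < len(string)) else ord("\0")
--
--         # Apply the simple hash
--         sumA += chunk
--         sumB += sumA
--
--     # Mask off everything except the target number of bytes.
--     mask = 0xFFFFFFFFFFFFFFFF
--     sumB &= mask >> ((8 - num_bytes) * 8)
--
--     return sumB
-- ===== SOURCE B (Python) =====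
-- def hash_string(num_bytes: int, string: str) -> int:
--     """
--     Converts a string into an integer hash value. This is primarily used to
--     convert register and isolation node names from the Chip and RAS Data into
--     integer values to save space in the data.
--     """
--     # Currently only supporting 1:8 byte hashes
--     assert 1 <= num_bytes and num_bytes <= 8
--
--     # Pad the string with NUL characters up to a multiple of num_bytes.
--     padded = string + "\0" * (-len(string) % num_bytes)
--
--     # Big-endian integer value of each num_bytes-sized chunk.
--     chunks = [int.from_bytes(padded[i:i + num_bytes].encode("latin-1"), "big")
--               for i in range(0, len(string), num_bytes)]
--
--     # Direct weighted sum: the first chunk weighted len(chunks), the last 1.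
--     total = sum(w * c for w, c in zip(range(len(chunks), 0, -1), chunks))
--
--     # Keep only the low num_bytes bytes.
--     return total % (256 ** num_bytes)
-- ===== Notes on version B (the rewrite author's own statement) =====
-- stated objective: alternative
-- what changed: B pads the string to a chunk multiple once, builds the list of big-endian chunk values, and returns one direct positional weighted sum (weight n..1 via zip) reduced modulo 256**num_bytes, instead of A's per-chunk inner shift/or loop feeding two running accumulators (sumA/sumB) and a shifted 64-bit mask.
import Mathlib
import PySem

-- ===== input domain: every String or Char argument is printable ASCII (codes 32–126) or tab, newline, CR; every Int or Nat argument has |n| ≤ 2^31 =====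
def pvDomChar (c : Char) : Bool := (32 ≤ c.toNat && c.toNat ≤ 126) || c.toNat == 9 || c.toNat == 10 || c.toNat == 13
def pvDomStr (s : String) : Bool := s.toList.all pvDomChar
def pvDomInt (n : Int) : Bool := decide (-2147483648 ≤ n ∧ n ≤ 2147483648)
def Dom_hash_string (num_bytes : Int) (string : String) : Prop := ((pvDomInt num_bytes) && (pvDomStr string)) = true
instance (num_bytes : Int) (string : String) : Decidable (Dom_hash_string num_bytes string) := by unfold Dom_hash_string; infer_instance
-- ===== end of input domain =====

-- B replaces A's two running accumulators by padding the string once, listing the big-endian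
-- chunk values, and taking one direct weighted sum reduced modulo 256^num_bytes (objective: alternative).

-- ===== PORT A =====
-- Literal port of A. Python ints here are always non-negative, so the running state is Nat;
-- the guarded string index is exact via PySem.List.pyGetD (the branch guarantees in-range).
def hash_string (num_bytes : Int) (string : String) : Int :=
  -- assert 1 <= num_bytes <= 8 : raises AssertionError otherwise; excluded by Pre_hash_string
  let l := string.toList
  let len : Int := l.length
  let p := (PySem.List.pyRange 0 len num_bytes).foldl
    (fun (p : Nat × Nat) i =>
      let chunk := (PySem.List.pyRange 0 num_bytes 1).foldl
        (fun c j =>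
          (c <<< 8) ||| (if i + j < len then (PySem.List.pyGetD l (i + j) (Char.ofNat 0)).toNat else 0))
        0
      let sumA := p.1 + chunk
      let sumB := p.2 + sumA
      (sumA, sumB))
    (0, 0)
  let mask : Nat := 0xFFFFFFFFFFFFFFFF
  -- (8 - num_bytes).toNat : exact under Pre_ (num_bytes ≤ 8; Python raises on a negative shift)
  Int.ofNat (p.2 &&& (mask >>> ((8 - num_bytes).toNat * 8)))

-- ===== PORT B =====
-- int.from_bytes(piece, "big") : big-endian byte fold; .encode("latin-1") is the identity on
-- the char codes < 256 admitted by Dom_hash_string.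
def pvFromBytesBE (piece : List Char) : Nat :=
  piece.foldl (fun a ch => a * 256 + ch.toNat) 0

def hash_string_alt (num_bytes : Int) (string : String) : Int :=
  -- assert 1 <= num_bytes <= 8 : raises AssertionError otherwise; excluded by Pre_hash_string
  let l := string.toList
  let len : Int := l.length
  -- padded = string + "\0" * (-len(string) % num_bytes)
  let padded := l ++ List.replicate (PySem.Int.mod (-len) num_bytes).toNat (Char.ofNat 0)
  let chunks := (PySem.List.pyRange 0 len num_bytes).map
    (fun i => pvFromBytesBE (PySem.List.slice padded (some i) (some (i + num_bytes))))
  let total := ((PySem.List.pyRange (chunks.length : Int) 0 (-1)).zip chunks).foldl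
    (fun acc wc => acc + wc.1 * (wc.2 : Int)) 0
  -- 256 ** num_bytes : exact for num_bytes ≥ 0 (Pre_ gives 1 ≤ num_bytes)
  PySem.Int.mod total ((256 : Int) ^ num_bytes.toNat)

-- ===== PRECONDITION & SPEC =====
-- Pre_ excludes exactly the inputs on which A's `assert 1 <= num_bytes <= 8` raises AssertionError.
def Pre_hash_string (num_bytes : Int) (string : String) : Prop :=
  1 ≤ num_bytes ∧ num_bytes ≤ 8
instance (num_bytes : Int) (string : String) : Decidable (Pre_hash_string num_bytes string) := by
  unfold Pre_hash_string; infer_instance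

def pvWitness_hash_string : Int × String := (2, "NODE_ATTN_TYPE")

def Spec_hash_string (num_bytes : Int) (string : String) (out : Int) : Prop := out = hash_string_alt num_bytes string
instance (num_bytes : Int) (string : String) (out : Int) : Decidable (Spec_hash_string num_bytes string out) := by unfold Spec_hash_string; infer_instance

-- ===== CLAIM (what is proved, stated in full; the proofs are below) =====
def Claim_equal_hash_string : Prop := ∀ (num_bytes : Int) (string : String), Dom_hash_string num_bytes string → Pre_hash_string num_bytes string → Spec_hash_string num_bytes string (hash_string num_bytes string)

-- ===== LEMMAS AND PROOFS =====

-- weighted sum: the head of an n-element list weighs n, the last element weighs 1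
def pvW : List Nat → Nat
  | [] => 0
  | c :: cs => (cs.length + 1) * c + pvW cs

theorem pv_or_add (a b : Nat) (h : b < 256) : (a <<< 8) ||| b = a * 256 + b := by
  apply Nat.eq_of_testBit_eq
  intro i
  have h2 : a * 256 + b = 2 ^ 8 * a + b := by ring_nf
  rw [h2, Nat.testBit_two_pow_mul_add a (by omega) i]
  simp only [Nat.testBit_lor, Nat.testBit_shiftLeft]
  by_cases hi : i < 8
  · simp [hi, show ¬ (8 ≤ i) by omega]
  · simp [hi, show 8 ≤ i by omega, Nat.testBit_lt_two_pow (by calc b < 2 ^ 8 := by omega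
      _ ≤ 2 ^ i := Nat.pow_le_pow_right (by norm_num) (by omega))]

theorem pv_foldl_or_eq (bs : List Nat) (h : ∀ b ∈ bs, b < 256) :
    ∀ a, bs.foldl (fun c b => (c <<< 8) ||| b) a = bs.foldl (fun c b => c * 256 + b) a := by
  induction bs with
  | nil => intro a; rfl
  | cons b bs ih =>
    intro a
    simp only [List.foldl_cons]
    rw [pv_or_add a b (h b List.mem_cons_self), ih (fun x hx => h x (List.mem_cons_of_mem _ hx))]

-- A's inner loop (the chunk value), extracted
def pvChunkA (l : List Char) (nb : Int) (i : Int) : Nat :=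
  (PySem.List.pyRange 0 nb 1).foldl
    (fun c j =>
      (c <<< 8) ||| (if i + j < (l.length : Int) then (PySem.List.pyGetD l (i + j) (Char.ofNat 0)).toNat else 0))
    0

theorem pvChunkA_eq (l : List Char) (nb i : Int) :
    (PySem.List.pyRange 0 nb 1).foldl
      (fun c j =>
        (c <<< 8) ||| (if i + j < (l.length : Int) then (PySem.List.pyGetD l (i + j) (Char.ofNat 0)).toNat else 0))
      0 = pvChunkA l nb i := rfl

theorem pv_foldA (F : Int → Nat) :
    ∀ (R : List Int) (a b : Nat),
      R.foldl (fun p i => (p.1 + F i, p.2 + (p.1 + F i))) (a, b)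
        = (a + (R.map F).sum, b + R.length * a + pvW (R.map F)) := by
  intro R
  induction R with
  | nil => intro a b; simp [pvW]
  | cons x R ih =>
    intro a b
    simp only [List.foldl_cons, List.map_cons, List.sum_cons, List.length_cons, pvW, ih]
    refine Prod.ext ?_ ?_ <;> simp only [List.length_map] <;> ring

theorem pv_foldB :
    ∀ (cs : List Nat) (acc : Int),
      ((PySem.List.pyRange (cs.length : Int) 0 (-1)).zip cs).foldl
        (fun acc wc => acc + wc.1 * (wc.2 : Int)) acc = acc + (pvW cs : Int) := by
  intro cs
  induction cs with
  | nil => intro acc; simp [PySem.List.pyRange_neg_one_eq_nil, pvW]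
  | cons c cs ih =>
    intro acc
    have h : ((c :: cs).length : Int) = (cs.length : Int) + 1 := by simp
    rw [h, PySem.List.pyRange_neg_one_cons (by positivity)]
    simp only [add_sub_cancel_right, List.zip_cons_cons, List.foldl_cons, ih, pvW]
    push_cast
    ring

-- A's conditional bytes, listed, are B's sliced-and-padded bytes
theorem pv_bytes_eq (l : List Char) (nb : Int) (h1 : 1 ≤ nb) (i : Int)
    (hi : i ∈ PySem.List.pyRange 0 (l.length : Int) nb) :
    (PySem.List.slice
        (l ++ List.replicate (PySem.Int.mod (-(l.length : Int)) nb).toNat (Char.ofNat 0))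
        (some i) (some (i + nb))).map Char.toNat
      = (List.range nb.toNat).map
          (fun (k : Nat) => if i + (0 + (k : Int)) < (l.length : Int)
                    then (PySem.List.pyGetD l (i + (0 + (k : Int))) (Char.ofNat 0)).toNat else 0) := by
  obtain ⟨hi0, hilt, hdvd⟩ := (PySem.List.mem_pyRange_iff_of_pos (by omega) i).mp hi
  simp only [sub_zero] at hdvd
  set len := l.length with hlen
  set pad := (PySem.Int.mod (-(len : Int)) nb).toNat with hpad
  have hmod : PySem.Int.mod (-(len : Int)) nb = (-(len : Int)) % nb := by
    simp [PySem.Int.mod, Int.fmod_eq_emod]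
    intro h; omega
  have hpad0 : 0 ≤ (-(len : Int)) % nb := Int.emod_nonneg _ (by omega)
  have hpadc : (pad : Int) = (-(len : Int)) % nb := by rw [hpad, hmod]; omega
  have hdvd2 : nb ∣ ((len : Int) + pad) := by
    rw [hpadc]
    apply Int.dvd_of_emod_eq_zero
    rw [Int.add_emod, Int.emod_emod_of_dvd _ (dvd_refl nb), ← Int.add_emod]
    simp
  have hkey : i + nb ≤ (len : Int) + pad := by
    have hd : nb ∣ ((len : Int) + pad - i) := dvd_sub hdvd2 hdvd
    have : nb ≤ (len : Int) + pad - i := Int.le_of_dvd (by omega) hd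
    omega
  obtain ⟨i', hii⟩ : ∃ i' : Nat, (i' : Int) = i := ⟨i.toNat, Int.toNat_of_nonneg hi0⟩
  subst hii
  have hslice : PySem.List.slice (l ++ List.replicate pad (Char.ofNat 0)) (some (i' : Int)) (some ((i' : Int) + nb))
      = ((l ++ List.replicate pad (Char.ofNat 0)).drop i').take nb.toNat := by
    rw [PySem.List.slice_toNat _ (by positivity) (by omega)]
    rw [Int.toNat_natCast]
    congr 1
    omega
  rw [hslice]
  have hlenpad : (l ++ List.replicate pad (Char.ofNat 0)).length = len + pad := by simp [hlen]
  apply List.ext_getElem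
  · simp only [List.length_map, List.length_take, List.length_drop, hlenpad, List.length_range]
    omega
  · intro j hj1 hj2
    simp only [List.length_map, List.length_take, List.length_drop, hlenpad] at hj1
    have hjnb : j < nb.toNat := by omega
    have hbound : i' + j < len + pad := by omega
    simp only [List.getElem_map, List.getElem_take, List.getElem_drop, List.getElem_range]
    have harg : (i' : Int) + (0 + (j : Int)) = ((i' + j : Nat) : Int) := by push_cast; ring
    rw [harg]
    by_cases hcase : i' + j < len
    · rw [List.getElem_append_left (by omega : i' + j < l.length)]
      rw [if_pos (by exact_mod_cast (by omega : ((i' + j : Nat) : Int) < (len : Int))),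
        PySem.List.pyGetD_natCast, List.getD_eq_getElem l _ (by omega)]
    · rw [List.getElem_append_right (by omega : l.length ≤ i' + j)]
      rw [if_neg (by push_cast; omega)]
      simp

-- A's chunk equals B's chunk
theorem pv_chunk_eq (l : List Char) (hl : ∀ c ∈ l, c.toNat < 256) (nb : Int)
    (h1 : 1 ≤ nb) (i : Int) (hi : i ∈ PySem.List.pyRange 0 (l.length : Int) nb) :
    pvChunkA l nb i =
      pvFromBytesBE (PySem.List.slice
        (l ++ List.replicate (PySem.Int.mod (-(l.length : Int)) nb).toNat (Char.ofNat 0))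
        (some i) (some (i + nb))) := by
  unfold pvChunkA pvFromBytesBE
  rw [PySem.List.pyRange_one, List.foldl_map]
  rw [show ((nb - 0).toNat) = nb.toNat by omega]
  have hB := pv_bytes_eq l nb h1 i hi
  rw [show (fun (c : Nat) (k : Nat) =>
        (c <<< 8) ||| (if i + (0 + (k:Int)) < (l.length : Int) then (PySem.List.pyGetD l (i + (0 + (k:Int))) (Char.ofNat 0)).toNat else 0))
      = (fun (c : Nat) (k : Nat) =>
        (fun (c : Nat) (b : Nat) => (c <<< 8) ||| b) c
          ((fun (k : Nat) => if i + (0 + (k:Int)) < (l.length : Int) then (PySem.List.pyGetD l (i + (0 + (k:Int))) (Char.ofNat 0)).toNat else 0) k)) from rfl,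
    ← List.foldl_map]
  rw [← hB]
  rw [pv_foldl_or_eq _ ?_ 0]
  · rw [← List.foldl_map (f := Char.toNat) (g := fun (a b : Nat) => a * 256 + b)]
  · intro b hb
    simp only [List.mem_map] at hb
    obtain ⟨ch, hch, rfl⟩ := hb
    have : ch ∈ l ++ List.replicate (PySem.Int.mod (-(l.length : Int)) nb).toNat (Char.ofNat 0) :=
      PySem.List.mem_of_mem_slice _ _ _ hch
    rcases List.mem_append.mp this with h | h
    · exact hl ch h
    · rw [List.eq_of_mem_replicate h]; decide

-- ===== VERDICT (by name: the statement is the Claim_ definition above) =====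
theorem hash_string_spec : Claim_equal_hash_string := by
  intro nb s hDom hPre
  obtain ⟨h1, h8⟩ := hPre
  unfold Spec_hash_string hash_string hash_string_alt
  set l := s.toList with hl
  have hchars : ∀ c ∈ l, c.toNat < 256 := by
    simp only [Dom_hash_string, Bool.and_eq_true, pvDomStr, List.all_eq_true] at hDom
    intro c hc
    have := hDom.2 c hc
    simp only [pvDomChar, Bool.or_eq_true, Bool.and_eq_true, decide_eq_true_eq, beq_iff_eq] at this
    omega
  simp only [pvChunkA_eq]
  rw [pv_foldA (pvChunkA l nb)]
  rw [List.map_congr_left (fun i hi => pv_chunk_eq l hchars nb h1 i hi)]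
  set cs := (PySem.List.pyRange 0 (l.length : Int) nb).map
    (fun i => pvFromBytesBE (PySem.List.slice
      (l ++ List.replicate (PySem.Int.mod (-(l.length : Int)) nb).toNat (Char.ofNat 0))
      (some i) (some (i + nb)))) with hcs
  rw [pv_foldB cs 0]
  simp only [Nat.mul_zero, zero_add]
  set W := pvW cs with hW
  have hmod : PySem.Int.mod (W : Int) ((256 : Int) ^ nb.toNat)
      = ((W % 256 ^ nb.toNat : Nat) : Int) := by
    have hpos : (0 : Int) < (256 : Int) ^ nb.toNat := by positivity
    simp only [PySem.Int.mod, Int.fmod_eq_emod]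
    rw [if_pos (Or.inl (le_of_lt hpos))]
    push_cast
    simp
  rw [hmod]
  congr 1
  interval_cases nb
  · exact Nat.and_two_pow_sub_one_eq_mod W 8
  · exact Nat.and_two_pow_sub_one_eq_mod W 16
  · exact Nat.and_two_pow_sub_one_eq_mod W 24
  · exact Nat.and_two_pow_sub_one_eq_mod W 32
  · exact Nat.and_two_pow_sub_one_eq_mod W 40
  · exact Nat.and_two_pow_sub_one_eq_mod W 48
  · exact Nat.and_two_pow_sub_one_eq_mod W 56
  · exact Nat.and_two_pow_sub_one_eq_mod W 64
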